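-- pv_equiv track=rewrite | github.com/DHRRAM/RubiksCube | rubiks_cube.py | decode_edge_orientation
-- ===== SOURCE A (Python) =====
-- def decode_edge_orientation(index):
--     edge_orientation = [0] * 12
--     orientation_sum = 0
--
--     for position_index in range(10, -1, -1):
--         orientation = index & 1
--         edge_orientation[position_index] = orientation
--         orientation_sum += orientation
--         index >>= 1
--
--     edge_orientation[11] = orientation_sum % 2
--     return tuple(edge_orientation)
-- ===== SOURCE B (Python) =====
-- def decode_edge_orientation(index):
--     masked = index & 0x7FF
--     bits = [int(c) for c in format(masked, '011b')]
--     parity = sum(bits) % 2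
--     return tuple(bits + [parity])
-- ===== Notes on version B (the rewrite author's own statement) =====
-- stated objective: idiomatic
-- what changed: Replaces the 11-step bit-shift-and-accumulate loop with destructive list assignment by masking once (index & 0x7FF), formatting to an 11-character binary string, parsing its characters as the orientation bits and appending the parity sum.
import Mathlib
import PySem

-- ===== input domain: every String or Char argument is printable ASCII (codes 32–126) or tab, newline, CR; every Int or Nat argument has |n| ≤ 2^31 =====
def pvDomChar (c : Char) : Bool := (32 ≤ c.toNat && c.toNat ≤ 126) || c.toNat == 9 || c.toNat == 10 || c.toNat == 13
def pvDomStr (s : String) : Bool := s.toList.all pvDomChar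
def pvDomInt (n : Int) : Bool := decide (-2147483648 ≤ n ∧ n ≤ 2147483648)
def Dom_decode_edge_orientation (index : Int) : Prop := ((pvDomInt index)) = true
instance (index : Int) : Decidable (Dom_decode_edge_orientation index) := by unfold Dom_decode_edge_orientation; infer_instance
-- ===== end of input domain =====

-- B replaces A's bit-shift-and-accumulate loop by one mask + binary-string formatting + character parsing; same return value everywhere (equivalence is about the return value; A only mutates its own locals).

-- ===== PORT A =====
-- state = (edge_orientation, orientation_sum, index); Python's `index & 1` is PySem.Int.band,
-- `index >>= 1` is Int's arithmetic shift `>>> 1` (Python-exact per PySem), list assignment is pySetD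
-- (the indices 10..0 and 11 are always in range for the 12-element list).
def decode_edge_orientation (index : Int) : List Int :=
  let edge_orientation : List Int := List.replicate 12 0
  let st := (PySem.List.pyRange 10 (-1) (-1)).foldl
    (fun (st : List Int × Int × Int) position_index =>
      let orientation := PySem.Int.band st.2.2 1
      (PySem.List.pySetD st.1 position_index orientation,
       st.2.1 + orientation,
       st.2.2 >>> (1 : Nat)))
    (edge_orientation, 0, index)
  PySem.List.pySetD st.1 11 (PySem.Int.mod st.2.1 2)

-- ===== PORT B =====
-- format(masked, '011b') is ported as zero-padding PySem.Int.toBinChars (= format(·, 'b')) to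
-- width 11 on the left — exact here because masked = index & 0x7FF is nonnegative with at most
-- 11 binary digits; int(c) on a digit character is its code point minus 48 (exact for '0'/'1').
def decode_edge_orientation_alt (index : Int) : List Int :=
  let masked := PySem.Int.band index 2047
  let chars := PySem.Int.toBinChars masked
  let padded := List.replicate (11 - chars.length) '0' ++ chars
  let bits := padded.map (fun c => ((c.toNat : Int) - 48))
  bits ++ [PySem.Int.mod bits.sum 2]

-- ===== PRECONDITION & SPEC =====
def Spec_decode_edge_orientation (index : Int) (out : List Int) : Prop := out = decode_edge_orientation_alt index
instance (index : Int) (out : List Int) : Decidable (Spec_decode_edge_orientation index out) := by unfold Spec_decode_edge_orientation; infer_instance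

-- ===== CLAIM (what is proved, stated in full; the proofs are below) =====
def Claim_equal_decode_edge_orientation : Prop := ∀ (index : Int), Dom_decode_edge_orientation index → Spec_decode_edge_orientation index (decode_edge_orientation index)

-- ===== LEMMAS AND PROOFS =====

-- Python's `x & 2047` on arbitrary (also negative) ints is `x mod 2048`.
theorem pv_band2047 (x : Int) : PySem.Int.band x 2047 = x % 2048 := by
  have ht : Int.toNat 2047 = 2047 := rfl
  rcases (by omega : 0 ≤ x ∨ x < 0) with h | h
  · rw [PySem.Int.band_of_nonneg h (by norm_num), ht]
    have h2 := Nat.and_two_pow_sub_one_eq_mod x.toNat 11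
    simp only [show (2 : Nat) ^ 11 = 2048 from rfl] at h2
    rw [h2]; omega
  · have hb : PySem.Int.band x 2047 =
        (((2047 : Int).toNat - ((2047 : Int).toNat &&& (-x - 1).toNat) : Nat) : Int) := by
      simp only [PySem.Int.band, if_neg (by omega : ¬ 0 ≤ x), if_pos (by norm_num : (0:Int) ≤ 2047)]
    rw [hb, ht]
    have h2 := Nat.and_two_pow_sub_one_eq_mod (-x - 1).toNat 11
    simp only [show (2 : Nat) ^ 11 = 2048 from rfl] at h2
    rw [Nat.and_comm, h2]
    omega

-- Closed form of A's unrolled loop: MSB-first bits of the low 11 bits of x, then their parity.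
theorem pv_A_closed (x : Int) : decode_edge_orientation x =
    [x/1024%2, x/512%2, x/256%2, x/128%2, x/64%2, x/32%2, x/16%2, x/8%2, x/4%2, x/2%2, x%2,
     (x/1024%2 + x/512%2 + x/256%2 + x/128%2 + x/64%2 + x/32%2 + x/16%2 + x/8%2 + x/4%2 + x/2%2 + x) % 2] := by
  have hr : PySem.List.pyRange 10 (-1) (-1) = [10,9,8,7,6,5,4,3,2,1,0] := by decide
  have e2 : x/2/2 = x/4 := by omega
  have e3 : x/4/2 = x/8 := by omega
  have e4 : x/8/2 = x/16 := by omega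
  have e5 : x/16/2 = x/32 := by omega
  have e6 : x/32/2 = x/64 := by omega
  have e7 : x/64/2 = x/128 := by omega
  have e8 : x/128/2 = x/256 := by omega
  have e9 : x/256/2 = x/512 := by omega
  have e10 : x/512/2 = x/1024 := by omega
  simp [decode_edge_orientation, hr, PySem.Int.band_one, PySem.List.pySetD_of_nonneg,
    Int.shiftRight_eq_div_pow, List.set, e2, e3, e4, e5, e6, e7, e8, e9, e10]
  omega

-- MSB-first bit list of a Nat, of a given width.
def pv_bitsOf (m : Nat) : Nat → List Int
  | 0 => []
  | k+1 => pv_bitsOf (m / 2) k ++ [((m % 2 : Nat) : Int)]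

theorem pv_bitsOf_zero (k : Nat) : pv_bitsOf 0 k = List.replicate k 0 := by
  induction k with
  | zero => rfl
  | succ k ih =>
      rw [show pv_bitsOf 0 (k+1) = pv_bitsOf (0/2) k ++ [((0 % 2 : Nat) : Int)] from rfl]
      simp [ih, List.replicate_succ']

theorem pv_digitChar_lt_two (n : Nat) (h : n < 2) :
    ((Nat.digitChar n).toNat : Int) - 48 = (n : Nat) := by
  interval_cases n <;> simp [Nat.digitChar]

-- The zero-padded binary digits of m, parsed back to ints, are its width-k bit list.
theorem pv_padded_digits (k : Nat) (hk : 1 ≤ k) : ∀ m : Nat, m < 2^k →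
    (List.replicate (k - (Nat.toDigits 2 m).length) '0' ++ Nat.toDigits 2 m).map
      (fun c => ((c.toNat : Int) - 48)) = pv_bitsOf m k := by
  induction k with
  | zero => omega
  | succ k ih =>
      intro m hm
      by_cases h2 : m < 2
      · rw [Nat.toDigits_of_lt_base h2]
        rw [show pv_bitsOf m (k+1) = pv_bitsOf (m / 2) k ++ [((m % 2 : Nat) : Int)] from rfl]
        have hd : m / 2 = 0 := by omega
        have hmm : m % 2 = m := by omega
        rw [hd, pv_bitsOf_zero, hmm]
        simp [List.map_replicate, pv_digitChar_lt_two m h2]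
      · rw [Nat.toDigits_of_base_le (by norm_num) (by omega)]
        rw [show pv_bitsOf m (k+1) = pv_bitsOf (m / 2) k ++ [((m % 2 : Nat) : Int)] from rfl]
        have hk1 : 1 ≤ k := by
          rcases Nat.eq_zero_or_pos k with h | h
          · subst h; omega
          · exact h
        have hlt : m / 2 < 2^k := by
          have : 2^(k+1) = 2^k * 2 := by ring
          omega
        have hlen : (k + 1) - ((Nat.toDigits 2 (m / 2)).length + 1)
            = k - (Nat.toDigits 2 (m / 2)).length := by omega
        have := ih hk1 (m / 2) hlt
        rw [List.length_append, List.length_cons, List.length_nil, hlen]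
        rw [show List.replicate (k - (Nat.toDigits 2 (m/2)).length) '0' ++
              (Nat.toDigits 2 (m/2) ++ [(m % 2).digitChar])
            = (List.replicate (k - (Nat.toDigits 2 (m/2)).length) '0' ++ Nat.toDigits 2 (m/2))
              ++ [(m % 2).digitChar] from (List.append_assoc _ _ _).symm]
        rw [List.map_append, this]
        have hp : ((Nat.digitChar (m % 2)).toNat : Int) - 48 = ((m % 2 : Nat) : Int) :=
          pv_digitChar_lt_two (m % 2) (by omega)
        simp [hp]

-- Closed form of B: identical to A's.
theorem pv_B_closed (x : Int) : decode_edge_orientation_alt x =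
    [x/1024%2, x/512%2, x/256%2, x/128%2, x/64%2, x/32%2, x/16%2, x/8%2, x/4%2, x/2%2, x%2,
     (x/1024%2 + x/512%2 + x/256%2 + x/128%2 + x/64%2 + x/32%2 + x/16%2 + x/8%2 + x/4%2 + x/2%2 + x) % 2] := by
  have hmask : PySem.Int.band x 2047 = x % 2048 := pv_band2047 x
  have hnn : ¬ (x % 2048 < 0) := by omega
  have hchars : PySem.Int.toBinChars (x % 2048) = Nat.toDigits 2 (x % 2048).toNat := by
    simp only [PySem.Int.toBinChars, if_neg hnn]
  have hm : ((x % 2048).toNat : Int) = x % 2048 := by omega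
  have hlt : (x % 2048).toNat < 2^11 := by omega
  have hbits := pv_padded_digits 11 (by omega) (x % 2048).toNat hlt
  simp only [decode_edge_orientation_alt, hmask, hchars, hbits]
  rw [show ∀ n : Nat, pv_bitsOf n 11 =
      [((n/1024%2 : Nat) : Int), ((n/512%2 : Nat) : Int), ((n/256%2 : Nat) : Int),
       ((n/128%2 : Nat) : Int), ((n/64%2 : Nat) : Int), ((n/32%2 : Nat) : Int),
       ((n/16%2 : Nat) : Int), ((n/8%2 : Nat) : Int), ((n/4%2 : Nat) : Int),
       ((n/2%2 : Nat) : Int), ((n%2 : Nat) : Int)] from fun n => by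
    simp [pv_bitsOf, Nat.div_div_eq_div_mul]]
  have hmod : ∀ a : Int, PySem.Int.mod a 2 = a % 2 := by intro a; simp [pysem]
  simp only [hmod, List.sum_cons, List.sum_nil, List.cons_append, List.nil_append]
  simp only [List.cons.injEq, and_true]
  push_cast
  omega

-- ===== VERDICT (by name: the statement is the Claim_ definition above) =====
theorem decode_edge_orientation_spec : Claim_equal_decode_edge_orientation := by
  intro index _
  unfold Spec_decode_edge_orientation
  rw [pv_A_closed, pv_B_closed]
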